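-- pv_equiv track=rewrite | github.com/ongkangrui/SC4016-Cyber-Threat-Intelligence | scraping-files/noescape-ransomeware/noescape_helper.py | getDataType
-- ===== SOURCE A (Python) =====
-- def getDataType(text, dataType):
--     dataFiles = [0] * 15
--     data = text.split()
--     for key in dataType:
--         for i in dataType[key]:
--             for j in data:
--                 if i.lower() == j.lower():
--                     dataFiles[list(dataType).index(key)] = 1
--     return dataFiles
-- ===== SOURCE B (Python) =====
-- def getDataType(text, dataType):
--     dataFiles = [0] * 15
--     index = {}
--     for pos, key in enumerate(dataType):
--         for kw in dataType[key]:
--             index.setdefault(kw.lower(), []).append(pos)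
--     for word in text.split():
--         for pos in index.get(word.lower(), []):
--             dataFiles[pos] = 1
--     return dataFiles
-- ===== Notes on version B (the rewrite author's own statement) =====
-- stated objective: faster
-- what changed: Replaces A's keys-by-keywords-by-words triple scan (with a repeated list(dataType).index inner pass per match) by an inverted index mapping keyword.lower() to its key positions built once with enumerate, followed by a single pass over the words of text.split().
import Mathlib
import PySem

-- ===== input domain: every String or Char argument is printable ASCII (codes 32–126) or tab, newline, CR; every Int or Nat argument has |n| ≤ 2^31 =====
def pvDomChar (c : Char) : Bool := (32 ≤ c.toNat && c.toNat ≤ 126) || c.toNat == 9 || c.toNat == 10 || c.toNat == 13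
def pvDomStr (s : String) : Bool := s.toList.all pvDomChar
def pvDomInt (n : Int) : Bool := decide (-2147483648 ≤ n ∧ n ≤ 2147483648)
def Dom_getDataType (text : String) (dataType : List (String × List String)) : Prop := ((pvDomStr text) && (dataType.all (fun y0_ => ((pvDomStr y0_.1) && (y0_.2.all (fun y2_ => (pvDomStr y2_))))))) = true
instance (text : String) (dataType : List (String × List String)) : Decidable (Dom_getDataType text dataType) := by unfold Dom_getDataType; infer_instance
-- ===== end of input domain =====

-- B replaces A's keys × keywords × words triple scan (with a repeated list(dataType).index inner pass)
-- by an inverted index keyword.lower() → key positions built once, then a single pass over the words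
-- (objective: faster). Return-value equivalence only; neither version mutates its arguments.

-- ===== PORT A =====
-- literal transliteration of A: for key in dataType / for i in dataType[key] / for j in data,
-- dataFiles[list(dataType).index(key)] = 1 on a case-insensitive match
def getDataType (text : String) (dataType : List (String × List String)) : List Int :=
  let dataFiles := List.replicate 15 (0 : Int)
  let data := PySem.Str.split₀ text
  (dataType.map Prod.fst).foldl
    (fun df key =>
      ((List.lookup key dataType).getD []).foldl
        (fun df i =>
          data.foldl
            (fun df j =>
              if PySem.Str.lower i = PySem.Str.lower j then
                PySem.List.pySetD df (((PySem.List.index? (dataType.map Prod.fst) key).getD 0 : Nat) : Int) 1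
              else df)
            df)
        df)
    dataFiles

-- ===== PORT B =====
-- literal transliteration of B: build index = {kw.lower(): [key positions]} via enumerate,
-- then one pass over text.split() setting dataFiles[pos] = 1
def getDataType_alt (text : String) (dataType : List (String × List String)) : List Int :=
  let dataFiles := List.replicate 15 (0 : Int)
  let index :=
    (PySem.List.enumerate (dataType.map Prod.fst)).foldl
      (fun d pr =>
        ((List.lookup pr.2 dataType).getD []).foldl
          (fun d kw => d.modify (PySem.Str.lower kw) [] (· ++ [pr.1])) d)
      PySem.Dict.empty
  (PySem.Str.split₀ text).foldl
    (fun df word =>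
      (index.getD (PySem.Str.lower word) []).foldl
        (fun df pos => PySem.List.pySetD df pos 1) df)
    dataFiles

-- ===== PRECONDITION & SPEC =====
-- Pre_ excludes dicts with more than 15 keys — a match at key position ≥ 15 makes A raise
-- IndexError (with no match A still returns [0]*15, hence the cite) — and association lists with
-- duplicate keys, which a Python dict cannot represent.
def Pre_getDataType (text : String) (dataType : List (String × List String)) : Prop :=
  (dataType.map Prod.fst).Nodup ∧ dataType.length ≤ 15
instance (text : String) (dataType : List (String × List String)) : Decidable (Pre_getDataType text dataType) := by unfold Pre_getDataType; infer_instance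
def pvWitness_getDataType : String × (List (String × List String)) :=
  ("my SSN and email", [("ids", ["SSN", "Passport"]), ("contact", ["Email"])])
def Spec_getDataType (text : String) (dataType : List (String × List String)) (out : List Int) : Prop := out = getDataType_alt text dataType
instance (text : String) (dataType : List (String × List String)) (out : List Int) : Decidable (Spec_getDataType text dataType out) := by unfold Spec_getDataType; infer_instance

-- ===== CLAIM (what is proved, stated in full; the proofs are below) =====
def Claim_equal_getDataType : Prop := ∀ (text : String) (dataType : List (String × List String)), Dom_getDataType text dataType → Pre_getDataType text dataType → Spec_getDataType text dataType (getDataType text dataType)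

-- ===== LEMMAS AND PROOFS =====

-- folding "set position to 1" over a list of nonnegative positions, read back pointwise
theorem getElem?_foldl_setOne (ps : List Int) (df : List Int) (m : Nat)
    (hnn : ∀ p ∈ ps, 0 ≤ p) :
    (ps.foldl (fun d p => PySem.List.pySetD d p 1) df)[m]? =
      if ((m : Int) ∈ ps) ∧ m < df.length then some 1 else df[m]? := by
  induction ps generalizing df with
  | nil => simp
  | cons p ps ih =>
    have hp : (0:Int) ≤ p := hnn p (by simp)
    have hps : ∀ q ∈ ps, (0:Int) ≤ q := fun q hq => hnn q (by simp [hq])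
    simp only [List.foldl_cons, ih _ hps, PySem.List.pySetD_of_nonneg _ _ hp,
      List.length_set, List.getElem?_set, List.mem_cons]
    by_cases hm : m < df.length
    · by_cases hmem : (m : Int) ∈ ps
      · simp [hmem, hm]
      · by_cases hpe : (m : Int) = p
        · have ht : p.toNat = m := by omega
          simp [hm, hpe, ht]
        · have ht : ¬ p.toNat = m := by omega
          simp [hmem, hm, hpe, ht]
    · have h2 : df[m]? = none := List.getElem?_eq_none (by omega)
      simp only [hm, and_false, if_false, h2]
      split
    
      · rw [if_neg (by omega)]
      · rfl

-- foldl with pointwise-equal step functions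
theorem foldl_fun_congr {α γ : Type} (l : List α) (f g : γ → α → γ) (init : γ)
    (h : ∀ acc x, f acc x = g acc x) : l.foldl f init = l.foldl g init := by
  have hfg : f = g := funext fun a => funext (h a)
  rw [hfg]

-- a guarded inner loop is the fold over the flatMap of its singleton-or-empty bodies
theorem foldl_ite_eq_foldl_flatMap {α γ : Type} (xs : List α) (c : α → Prop) [DecidablePred c]
    (v : α → Int) (f : γ → Int → γ) (acc : γ) :
    xs.foldl (fun a x => if c x then f a (v x) else a) acc =
      (xs.flatMap (fun x => if c x then [v x] else [])).foldl f acc := by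
  rw [List.foldl_flatMap]
  induction xs generalizing acc with
  | nil => rfl
  | cons x xs ih => by_cases hx : c x <;> simp [hx, ih]

-- A's whole computation as one fold over its flattened list of assigned positions
def posA (data : List String) (dataType : List (String × List String)) : List Int :=
  (dataType.map Prod.fst).flatMap (fun key =>
    ((List.lookup key dataType).getD []).flatMap (fun i =>
      data.flatMap (fun j =>
        if PySem.Str.lower i = PySem.Str.lower j then
          [(((PySem.List.index? (dataType.map Prod.fst) key).getD 0 : Nat) : Int)]
        else [])))

theorem getDataType_eq_foldl : ∀ text dataType,
    getDataType text dataType =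
      (posA (PySem.Str.split₀ text) dataType).foldl
        (fun d p => PySem.List.pySetD d p 1) (List.replicate 15 (0 : Int)) := by
  intro text dataType
  unfold getDataType posA
  dsimp only
  rw [List.foldl_flatMap]
  refine foldl_fun_congr _ _ _ _ (fun df key => ?_)
  rw [List.foldl_flatMap]
  refine foldl_fun_congr _ _ _ _ (fun df i => ?_)
  exact foldl_ite_eq_foldl_flatMap (PySem.Str.split₀ text)
    (fun j => PySem.Str.lower i = PySem.Str.lower j)
    (fun _ => (((PySem.List.index? (dataType.map Prod.fst) key).getD 0 : Nat) : Int))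
    (fun d p => PySem.List.pySetD d p 1) df

-- B's index dict characterised: the positions stored under a lowercased word
def pairsB (dataType : List (String × List String)) : List (String × Int) :=
  (PySem.List.enumerate (dataType.map Prod.fst)).flatMap (fun pr =>
    ((List.lookup pr.2 dataType).getD []).map (fun kw => (PySem.Str.lower kw, pr.1)))

theorem indexB_getD (dataType : List (String × List String)) (s : String) :
    ((PySem.List.enumerate (dataType.map Prod.fst)).foldl
        (fun d pr =>
          ((List.lookup pr.2 dataType).getD []).foldl
            (fun d kw => d.modify (PySem.Str.lower kw) [] (· ++ [pr.1])) d)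
        PySem.Dict.empty).getD s []
      = ((pairsB dataType).filter (fun p => p.1 == s)).map (·.2) := by
  have h : ((pairsB dataType).foldl (fun d p => d.modify p.1 [] (· ++ [p.2]))
      (PySem.Dict.empty : PySem.Dict String (List Int))).getD s []
      = ((pairsB dataType).filter (fun p => p.1 == s)).map (·.2) := by
    rw [PySem.Dict.getD_foldl_modify_append]
    simp [PySem.Dict.getD_empty]
  rw [← h]
  refine congrArg (fun d => PySem.Dict.getD d s []) ?_
  unfold pairsB
  rw [List.foldl_flatMap]
  refine foldl_fun_congr _ _ _ _ (fun d pr => ?_)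
  rw [List.foldl_map]

def posB (data : List String) (dataType : List (String × List String)) : List Int :=
  data.flatMap (fun word =>
    ((pairsB dataType).filter (fun p => p.1 == PySem.Str.lower word)).map (·.2))

theorem getDataType_alt_eq_foldl : ∀ text dataType,
    getDataType_alt text dataType =
      (posB (PySem.Str.split₀ text) dataType).foldl
        (fun d p => PySem.List.pySetD d p 1) (List.replicate 15 (0 : Int)) := by
  intro text dataType
  unfold getDataType_alt posB
  dsimp only
  rw [List.foldl_flatMap]
  refine foldl_fun_congr _ _ _ _ (fun df word => ?_)
  rw [indexB_getD]

-- membership in the two position lists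
theorem mem_posA (data : List String) (dataType : List (String × List String)) (q : Int) :
    q ∈ posA data dataType ↔
      ∃ key ∈ dataType.map Prod.fst, ∃ i ∈ (List.lookup key dataType).getD [],
        ∃ j ∈ data, PySem.Str.lower i = PySem.Str.lower j ∧
          q = (((PySem.List.index? (dataType.map Prod.fst) key).getD 0 : Nat) : Int) := by
  unfold posA
  simp only [List.mem_flatMap]
  constructor
  · rintro ⟨key, hk, i, hi, j, hj, hq⟩
    split at hq
    · rename_i hc
      simp at hq
      exact ⟨key, hk, i, hi, j, hj, hc, hq⟩
    · simp at hq
  · rintro ⟨key, hk, i, hi, j, hj, hc, hq⟩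
    exact ⟨key, hk, i, hi, j, hj, by simp [hc, hq]⟩

theorem mem_posB (data : List String) (dataType : List (String × List String)) (q : Int) :
    q ∈ posB data dataType ↔
      ∃ j ∈ data, ∃ pr ∈ PySem.List.enumerate (dataType.map Prod.fst),
        ∃ kw ∈ (List.lookup pr.2 dataType).getD [],
          PySem.Str.lower kw = PySem.Str.lower j ∧ q = pr.1 := by
  unfold posB pairsB
  simp only [List.mem_flatMap, List.mem_map, List.mem_filter]
  constructor
  · rintro ⟨j, hj, p, ⟨⟨pr, hpr, kw, hkw, rfl⟩, heq⟩, rfl⟩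
    exact ⟨j, hj, pr, hpr, kw, hkw, by simpa using heq, rfl⟩
  · rintro ⟨j, hj, pr, hpr, kw, hkw, hc, rfl⟩
    exact ⟨j, hj, (PySem.Str.lower kw, pr.1), ⟨⟨pr, hpr, kw, hkw, rfl⟩, by simp [hc]⟩, rfl⟩

theorem posB_nonneg (data : List String) (dataType : List (String × List String)) :
    ∀ q ∈ posB data dataType, 0 ≤ q := by
  intro q hq
  rw [mem_posB] at hq
  obtain ⟨j, _, pr, hpr, _, _, _, rfl⟩ := hq
  rw [PySem.List.mem_enumerate_iff] at hpr
  obtain ⟨k, hk, rfl⟩ := hpr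
  simp

theorem index?_getElem_of_nodup {xs : List String} (h : xs.Nodup) (k : Nat) (hk : k < xs.length) :
    PySem.List.index? xs xs[k] = some k := by
  have hmem : xs[k] ∈ xs := List.getElem_mem hk
  have hs : (PySem.List.index? xs xs[k]).isSome := by
    rw [PySem.List.index?_isSome_iff]; exact hmem
  obtain ⟨k0, hk0⟩ := Option.isSome_iff_exists.mp hs
  obtain ⟨hk0lt, hget, _⟩ := PySem.List.getElem_of_index?_eq_some hk0
  have : k0 = k := by
    by_contra hne
    exact hne (List.Nodup.getElem_inj_iff h |>.mp hget)
  rw [hk0, this]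

-- the central fact: under Pre_, both programs assign exactly the same set of positions
theorem mem_posA_iff_mem_posB (data : List String) (dataType : List (String × List String))
    (hnd : (dataType.map Prod.fst).Nodup) (q : Int) :
    q ∈ posA data dataType ↔ q ∈ posB data dataType := by
  rw [mem_posA, mem_posB]
  constructor
  · rintro ⟨key, hk, i, hi, j, hj, hc, rfl⟩
    obtain ⟨k, hklt, hget⟩ := List.getElem_of_mem hk
    subst hget
    rw [index?_getElem_of_nodup hnd k hklt]
    refine ⟨j, hj, ((k : Int), (dataType.map Prod.fst)[k]), ?_, i, hi, hc, rfl⟩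
    rw [PySem.List.mem_enumerate_iff]
    exact ⟨k, hklt, by simp⟩
  · rintro ⟨j, hj, pr, hpr, kw, hkw, hc, rfl⟩
    rw [PySem.List.mem_enumerate_iff] at hpr
    obtain ⟨k, hklt, rfl⟩ := hpr
    refine ⟨(dataType.map Prod.fst)[k], List.getElem_mem hklt, kw, hkw, j, hj, hc, ?_⟩
    rw [index?_getElem_of_nodup hnd k hklt]
    simp

theorem posA_lt_len (data : List String) (dataType : List (String × List String))
    (q : Int) (hq : q ∈ posA data dataType) (hnd : (dataType.map Prod.fst).Nodup) :
    q < dataType.length := by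
  rw [mem_posA] at hq
  obtain ⟨key, hk, i, hi, j, hj, hc, rfl⟩ := hq
  obtain ⟨k, hklt, hget⟩ := List.getElem_of_mem hk
  subst hget
  rw [index?_getElem_of_nodup hnd k hklt]
  simp only [Option.getD_some]
  have : k < dataType.length := by simpa using hklt
  exact_mod_cast this

-- ===== VERDICT (by name: the statement is the Claim_ definition above) =====
theorem getDataType_spec : Claim_equal_getDataType := by
  intro text dataType _ hpre
  obtain ⟨hnd, hlen⟩ := hpre
  unfold Spec_getDataType
  rw [getDataType_eq_foldl, getDataType_alt_eq_foldl]
  set data := PySem.Str.split₀ text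
  have hAnn : ∀ q ∈ posA data dataType, (0:Int) ≤ q := by
    intro q hq
    rw [mem_posA_iff_mem_posB data dataType hnd] at hq
    exact posB_nonneg data dataType q hq
  apply List.ext_getElem?
  intro m
  rw [getElem?_foldl_setOne _ _ _ hAnn, getElem?_foldl_setOne _ _ _ (posB_nonneg data dataType)]
  simp only [List.length_replicate]
  by_cases hmem : ((m : Int)) ∈ posA data dataType
  · have hpB := (mem_posA_iff_mem_posB data dataType hnd _).mp hmem
    have hlt : ((m : Int)) < dataType.length := posA_lt_len data dataType _ hmem hnd
    have hm15 : m < 15 := by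
      have h15 : ((m : Int)) < 15 := lt_of_lt_of_le hlt (by exact_mod_cast hlen)
      omega
    rw [if_pos ⟨hmem, hm15⟩, if_pos ⟨hpB, hm15⟩]
  · have hmB : ((m : Int)) ∉ posB data dataType :=
      fun h => hmem ((mem_posA_iff_mem_posB data dataType hnd _).mpr h)
    simp [hmem, hmB]
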